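-- pv_equiv track=rewrite | github.com/olelindberg/drifter | scr/generate_report.py | order_solvers
-- ===== SOURCE A (Python) =====
-- SOLVER_ORDER = [
--     "direct",
--     "iterative_lu",
--     "iterative_mg",  # Legacy name
--     "iterative_mg_l2_galerkin",
--     "iterative_mg_l2_cached",
--     "iterative_mg_bezier_galerkin",
--     "iterative_mg_bezier_cached",
-- ]
--
-- def order_solvers(solver_names: list[str]) -> list[str]:
--     """Order solvers according to preferred order."""
--     ordered = []
--     for s in SOLVER_ORDER:
--         if s in solver_names:
--             ordered.append(s)
--     for s in solver_names:
--         if s not in ordered: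
--             ordered.append(s)
--     return ordered
-- ===== SOURCE B (Python) =====
-- SOLVER_ORDER = [
--     "direct",
--     "iterative_lu",
--     "iterative_mg",  # Legacy name
--     "iterative_mg_l2_galerkin",
--     "iterative_mg_l2_cached",
--     "iterative_mg_bezier_galerkin",
--     "iterative_mg_bezier_cached",
-- ]
--
-- _RANK = {name: i for i, name in enumerate(SOLVER_ORDER)}
--
-- def order_solvers(solver_names: list[str]) -> list[str]:
--     """Order solvers according to preferred order."""
--     deduped = list(dict.fromkeys(solver_names))
--     return sorted(deduped, key=lambda s: _RANK.get(s, len(SOLVER_ORDER)))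
-- ===== Notes on version B (the rewrite author's own statement) =====
-- stated objective: faster
-- what changed: Replaces A's scan of SOLVER_ORDER plus a quadratic 'not in ordered' membership loop with a rank dictionary, an ordered dedup via dict.fromkeys, and one stable sort keyed by rank.
import Mathlib
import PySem

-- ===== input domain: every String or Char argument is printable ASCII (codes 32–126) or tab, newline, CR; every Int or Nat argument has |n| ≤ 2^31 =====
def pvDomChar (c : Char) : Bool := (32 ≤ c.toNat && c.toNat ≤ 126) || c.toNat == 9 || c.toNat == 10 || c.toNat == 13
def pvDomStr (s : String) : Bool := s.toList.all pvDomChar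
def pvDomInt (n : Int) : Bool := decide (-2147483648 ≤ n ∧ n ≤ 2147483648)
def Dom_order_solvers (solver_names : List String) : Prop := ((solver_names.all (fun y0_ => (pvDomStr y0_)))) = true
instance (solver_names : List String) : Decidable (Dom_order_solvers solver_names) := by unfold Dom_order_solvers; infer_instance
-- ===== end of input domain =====

-- B replaces A's SOLVER_ORDER scan + quadratic 'not in ordered' loop by a rank dict, an ordered dedup and one stable sort (measured faster).

def SOLVER_ORDER : List String :=
  ["direct",
   "iterative_lu",
   "iterative_mg",
   "iterative_mg_l2_galerkin",
   "iterative_mg_l2_cached",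
   "iterative_mg_bezier_galerkin",
   "iterative_mg_bezier_cached"]

-- ===== PORT A =====
def order_solvers (solver_names : List String) : List String :=
  let ordered := SOLVER_ORDER.foldl
    (fun acc s => if s ∈ solver_names then acc ++ [s] else acc) []
  solver_names.foldl
    (fun acc s => if s ∈ acc then acc else acc ++ [s]) ordered

-- ===== PORT B =====
-- _RANK = {name: i for i, name in enumerate(SOLVER_ORDER)}
def pvRank : PySem.Dict String Int :=
  (PySem.List.enumerate SOLVER_ORDER).foldl (fun d p => d.insert p.2 p.1) PySem.Dict.empty

def order_solvers_alt (solver_names : List String) : List String :=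
  let deduped := PySem.List.dedup solver_names
  PySem.List.sorted deduped (fun s => pvRank.getD s (SOLVER_ORDER.length : Int)) false

-- ===== PRECONDITION & SPEC =====
def Spec_order_solvers (solver_names : List String) (out : List String) : Prop := out = order_solvers_alt solver_names
instance (solver_names : List String) (out : List String) : Decidable (Spec_order_solvers solver_names out) := by unfold Spec_order_solvers; infer_instance

-- ===== CLAIM (what is proved, stated in full; the proofs are below) =====
def Claim_equal_order_solvers : Prop := ∀ (solver_names : List String), Dom_order_solvers solver_names → Spec_order_solvers solver_names (order_solvers solver_names)

-- ===== LEMMAS AND PROOFS =====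

-- the sort key of B, as a standalone function
def pvKey (s : String) : Int := pvRank.getD s (SOLVER_ORDER.length : Int)

-- ordered first-occurrence dedup of l, skipping everything in avoid
def ded (avoid : List String) : List String → List String
  | [] => []
  | s :: t => if s ∈ avoid then ded avoid t else s :: ded (avoid ++ [s]) t

-- the common normal form both programs compute
def pvT (p : List String) : List String :=
  SOLVER_ORDER.filter (fun s => decide (s ∈ p)) ++ p.filter (fun s => !decide (s ∈ SOLVER_ORDER))

lemma pvKey_eq (s : String) :
    pvKey s = if s = "iterative_mg_bezier_cached" then 6
      else if s = "iterative_mg_bezier_galerkin" then 5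
      else if s = "iterative_mg_l2_cached" then 4
      else if s = "iterative_mg_l2_galerkin" then 3
      else if s = "iterative_mg" then 2
      else if s = "iterative_lu" then 1
      else if s = "direct" then 0
      else 7 := by
  show (((((((PySem.Dict.empty.insert "direct" (0:Int)).insert "iterative_lu" 1).insert
      "iterative_mg" 2).insert "iterative_mg_l2_galerkin" 3).insert "iterative_mg_l2_cached" 4).insert
      "iterative_mg_bezier_galerkin" 5).insert "iterative_mg_bezier_cached" 6).getD s 7 = _
  simp [PySem.Dict.getD_insert, PySem.Dict.getD_empty]

lemma pvKey_le (s : String) : pvKey s ≤ 7 := by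
  rw [pvKey_eq]; split_ifs <;> norm_num

lemma pvKey_of_not_mem {s : String} (h : s ∉ SOLVER_ORDER) : pvKey s = 7 := by
  simp [SOLVER_ORDER] at h
  rw [pvKey_eq]
  simp [h.1, h.2.1, h.2.2.1, h.2.2.2.1, h.2.2.2.2.1, h.2.2.2.2.2.1, h.2.2.2.2.2.2]

-- A's second loop
lemma foldl_dedupStep (l : List String) : ∀ acc : List String,
    l.foldl (fun acc s => if s ∈ acc then acc else acc ++ [s]) acc = acc ++ ded acc l := by
  induction l with
  | nil => intro acc; simp [ded]
  | cons x t ih =>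
    intro acc
    simp only [List.foldl_cons, ded]
    by_cases hx : x ∈ acc
    · rw [if_pos hx, if_pos hx, ih acc]
    · rw [if_neg hx, if_neg hx, ih (acc ++ [x])]
      simp

lemma ded_congr (l : List String) : ∀ a1 a2 : List String,
    (∀ s ∈ l, s ∈ a1 ↔ s ∈ a2) → ded a1 l = ded a2 l := by
  induction l with
  | nil => intro _ _ _; rfl
  | cons x t ih =>
    intro a1 a2 h
    have hx := h x (by simp)
    simp only [ded]
    by_cases hc : x ∈ a2
    · rw [if_pos hc, if_pos (hx.mpr hc)]
      exact ih a1 a2 (fun s hs => h s (by simp [hs]))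
    · rw [if_neg hc, if_neg (fun h1 => hc (hx.mp h1))]
      refine congrArg (x :: ·) (ih (a1 ++ [x]) (a2 ++ [x]) (fun s hs => ?_))
      simp only [List.mem_append, List.mem_singleton]
      rw [h s (by simp [hs])]

lemma ded_rel (l : List String) : ∀ u v : List String,
    (∀ x, x ∈ v ↔ (x ∈ SOLVER_ORDER ∨ x ∈ u)) →
    (ded u l).filter (fun s => !decide (s ∈ SOLVER_ORDER)) = ded v l := by
  induction l with
  | nil => intro _ _ _; rfl
  | cons x t ih =>
    intro u v hrel
    simp only [ded]
    by_cases hu : x ∈ u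
    · have hv : x ∈ v := (hrel x).mpr (Or.inr hu)
      rw [if_pos hu, if_pos hv]
      exact ih u v hrel
    · by_cases hso : x ∈ SOLVER_ORDER
      · have hv : x ∈ v := (hrel x).mpr (Or.inl hso)
        rw [if_neg hu, if_pos hv,
          List.filter_cons_of_neg (by simp [hso])]
        exact ih (u ++ [x]) v (fun y => by
          rw [hrel y]
          simp only [List.mem_append, List.mem_singleton]
          constructor
          · rintro (h1 | h1)
            · exact Or.inl h1
            · exact Or.inr (Or.inl h1)
          · rintro (h1 | h1 | rfl)
            · exact Or.inl h1
            · exact Or.inr h1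
            · exact Or.inl hso)
      · have hv : x ∉ v := fun h1 => by
          rcases (hrel x).mp h1 with h2 | h2
          · exact hso h2
          · exact hu h2
        rw [if_neg hu, if_neg hv, List.filter_cons_of_pos (by simp [hso])]
        refine congrArg (x :: ·) (ih (u ++ [x]) (v ++ [x]) (fun y => ?_))
        simp only [List.mem_append, List.mem_singleton, hrel y]
        tauto

-- insertBy splits around the insertion point
lemma insertBy_middle (before : String → String → Bool) (x : String) :
    ∀ a b : List String, (∀ y ∈ a, before x y = false) → (∀ y ∈ b, before x y = true) →
    PySem.List.insertBy before x (a ++ b) = a ++ x :: b := by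
  intro a
  induction a with
  | nil =>
    intro b _ hb
    cases b with
    | nil => rfl
    | cons h t => simp [PySem.List.insertBy, hb h (by simp)]
  | cons k a' ih =>
    intro b ha hb
    have hk := ha k (by simp)
    simp only [List.cons_append, PySem.List.insertBy, hk, Bool.false_eq_true, if_false]
    rw [ih b (fun y hy => ha y (by simp [hy])) hb]

-- inserting a name that has a rank: it lands exactly between its predecessors and successors
lemma ins_step_known (L1 L2 : List String) (x : String) (p : List String)
    (hSO : SOLVER_ORDER = L1 ++ x :: L2)
    (hx1 : x ∉ L1) (hx2 : x ∉ L2) (hxp : x ∉ p)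
    (hb1 : ∀ y ∈ L1, decide (pvKey x < pvKey y) = false)
    (hb2 : ∀ y ∈ L2, decide (pvKey x < pvKey y) = true)
    (hk : pvKey x < 7) :
    PySem.List.insertBy (fun a b => decide (pvKey a < pvKey b)) x (pvT p) = pvT (p ++ [x]) := by
  have hxSO : x ∈ SOLVER_ORDER := by rw [hSO]; simp
  have hT : pvT p
      = L1.filter (fun s => decide (s ∈ p))
        ++ (L2.filter (fun s => decide (s ∈ p)) ++ p.filter (fun s => !decide (s ∈ SOLVER_ORDER))) := by
    rw [pvT, hSO, List.filter_append, List.filter_cons_of_neg (by simp [hxp]), List.append_assoc]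
  rw [hT, insertBy_middle _ x _ _
    (fun y hy => hb1 y (List.mem_of_mem_filter hy))
    (by
      intro y hy
      rcases List.mem_append.mp hy with hy1 | hy2
      · exact hb2 y (List.mem_of_mem_filter hy1)
      · have : ¬ (y ∈ SOLVER_ORDER) := by
          have := List.of_mem_filter hy2
          simpa using this
        rw [pvKey_of_not_mem this]
        simpa using hk)]
  have h1 : L1.filter (fun s => decide (s ∈ p ++ [x])) = L1.filter (fun s => decide (s ∈ p)) :=
    List.filter_congr (fun s hs => by
      have hne : s ≠ x := fun h => hx1 (h ▸ hs)
      simp [hne])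
  have h2 : L2.filter (fun s => decide (s ∈ p ++ [x])) = L2.filter (fun s => decide (s ∈ p)) :=
    List.filter_congr (fun s hs => by
      have hne : s ≠ x := fun h => hx2 (h ▸ hs)
      simp [hne])
  rw [pvT, hSO, List.filter_append, List.filter_cons_of_pos (by simp),
    List.filter_append, List.filter_cons_of_neg (by simp), h1, h2]
  simp

-- the insertion step preserves the normal form
lemma ins_step (x : String) (p : List String) (hx : x ∉ p) :
    PySem.List.insertBy (fun a b => decide (pvKey a < pvKey b)) x (pvT p) = pvT (p ++ [x]) := by
  by_cases hso : x ∈ SOLVER_ORDER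
  · have hm : x = "direct" ∨ x = "iterative_lu" ∨ x = "iterative_mg" ∨
        x = "iterative_mg_l2_galerkin" ∨ x = "iterative_mg_l2_cached" ∨
        x = "iterative_mg_bezier_galerkin" ∨ x = "iterative_mg_bezier_cached" := by
      simpa [SOLVER_ORDER] using hso
    rcases hm with rfl | rfl | rfl | rfl | rfl | rfl | rfl
    · exact ins_step_known [] ["iterative_lu", "iterative_mg", "iterative_mg_l2_galerkin",
        "iterative_mg_l2_cached", "iterative_mg_bezier_galerkin", "iterative_mg_bezier_cached"]
        _ p rfl (by decide) (by decide) hx (by decide) (by decide) (by decide)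
    · exact ins_step_known ["direct"] ["iterative_mg", "iterative_mg_l2_galerkin",
        "iterative_mg_l2_cached", "iterative_mg_bezier_galerkin", "iterative_mg_bezier_cached"]
        _ p rfl (by decide) (by decide) hx (by decide) (by decide) (by decide)
    · exact ins_step_known ["direct", "iterative_lu"] ["iterative_mg_l2_galerkin",
        "iterative_mg_l2_cached", "iterative_mg_bezier_galerkin", "iterative_mg_bezier_cached"]
        _ p rfl (by decide) (by decide) hx (by decide) (by decide) (by decide)
    · exact ins_step_known ["direct", "iterative_lu", "iterative_mg"]
        ["iterative_mg_l2_cached", "iterative_mg_bezier_galerkin", "iterative_mg_bezier_cached"]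
        _ p rfl (by decide) (by decide) hx (by decide) (by decide) (by decide)
    · exact ins_step_known ["direct", "iterative_lu", "iterative_mg", "iterative_mg_l2_galerkin"]
        ["iterative_mg_bezier_galerkin", "iterative_mg_bezier_cached"]
        _ p rfl (by decide) (by decide) hx (by decide) (by decide) (by decide)
    · exact ins_step_known ["direct", "iterative_lu", "iterative_mg", "iterative_mg_l2_galerkin",
        "iterative_mg_l2_cached"] ["iterative_mg_bezier_cached"]
        _ p rfl (by decide) (by decide) hx (by decide) (by decide) (by decide)
    · exact ins_step_known ["direct", "iterative_lu", "iterative_mg", "iterative_mg_l2_galerkin",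
        "iterative_mg_l2_cached", "iterative_mg_bezier_galerkin"] []
        _ p rfl (by decide) (by decide) hx (by decide) (by decide) (by decide)
  · have hkx : pvKey x = 7 := pvKey_of_not_mem hso
    rw [PySem.List.insertBy_of_forall_not_before _ _ _ (by
      intro y _
      rw [hkx]
      simpa using pvKey_le y)]
    have h1 : SOLVER_ORDER.filter (fun s => decide (s ∈ p ++ [x]))
        = SOLVER_ORDER.filter (fun s => decide (s ∈ p)) :=
      List.filter_congr (fun s hs => by
        have hne : s ≠ x := fun h => hso (h ▸ hs)
        simp [hne])
    rw [pvT, pvT, List.filter_append, List.filter_cons_of_pos (by simp [hso]), h1]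
    simp

-- the sorting fold builds the normal form
lemma fold_ins (l : List String) : ∀ p : List String, (p ++ l).Nodup →
    l.foldl (fun acc x => PySem.List.insertBy (fun a b => decide (pvKey a < pvKey b)) x acc) (pvT p)
      = pvT (p ++ l) := by
  induction l with
  | nil => intro p _; simp
  | cons x t ih =>
    intro p hnd
    have hx : x ∉ p := by
      have := List.disjoint_of_nodup_append hnd
      intro hxp; exact this hxp (by simp)
    simp only [List.foldl_cons, ins_step x p hx]
    have := ih (p ++ [x]) (by simpa using hnd)
    simpa using this

-- Python's set()/dict.fromkeys() builder is the same avoid-list recursion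
lemma dedup_eq_ded (l : List String) : PySem.List.dedup l = ded [] l := by
  suffices h : ∀ acc : List String, l.foldl PySem.Set.add acc = acc ++ ded acc l by
    simpa using h []
  induction l with
  | nil => intro acc; simp [ded]
  | cons x t ih =>
    intro acc
    simp only [List.foldl_cons, ded, PySem.Set.add, PySem.Set.contains]
    by_cases hx : x ∈ acc
    · rw [if_pos (by simpa [List.contains_eq_mem] using hx), if_pos hx, ih acc]
    · rw [if_neg (by simpa [List.contains_eq_mem] using hx), if_neg hx, ih (acc ++ [x])]
      simp

-- ===== VERDICT (by name: the statement is the Claim_ definition above) =====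
theorem order_solvers_spec : Claim_equal_order_solvers := by
  unfold Claim_equal_order_solvers Spec_order_solvers
  intro names _
  -- A's side: first loop filters SOLVER_ORDER, second loop is ded over the result
  rw [order_solvers]
  rw [PySem.List.foldl_append_ite_eq_filter (fun s => s ∈ names) SOLVER_ORDER []]
  rw [foldl_dedupStep]
  rw [List.nil_append]
  rw [ded_congr names _ SOLVER_ORDER (by
    intro s hs
    simp [List.mem_filter, hs])]
  -- B's side: the stable insertion sort of the dedup builds the same normal form
  rw [order_solvers_alt]
  rw [PySem.List.sorted_eq_foldl_insertBy]
  have hkey : ∀ (acc : List String) (x : String),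
      PySem.List.insertBy (fun a b => decide (pvRank.getD a (SOLVER_ORDER.length : Int)
        < pvRank.getD b (SOLVER_ORDER.length : Int))) x acc
      = PySem.List.insertBy (fun a b => decide (pvKey a < pvKey b)) x acc := fun _ _ => rfl
  simp only [hkey]
  have hnil : pvT [] = [] := by simp [pvT, SOLVER_ORDER]
  have hfold := fold_ins (PySem.List.dedup names) []
  rw [hnil, List.nil_append] at hfold
  rw [hfold (PySem.List.nodup_dedup names)]
  rw [pvT, dedup_eq_ded]
  have h1 : SOLVER_ORDER.filter (fun s => decide (s ∈ ded [] names))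
      = SOLVER_ORDER.filter (fun s => decide (s ∈ names)) :=
    List.filter_congr (fun s _ => by simp only [← dedup_eq_ded, PySem.List.mem_dedup])
  rw [h1, ded_rel names [] SOLVER_ORDER (by intro y; simp)]
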